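-- pv_equiv track=rewrite | github.com/shriatluri/geo | geo-platform/agents/src/geo_agent/analyzer.py | _determine_primary_business_name
-- ===== SOURCE A (Python) =====
-- from typing import Dict, Any, List, Optional, Tuple
--
-- def _determine_primary_business_name(sources: Dict[str, str]) -> str:
--     """Determine the most likely primary business name."""
--     # Remove empty sources
--     valid_sources = {k: v for k, v in sources.items() if v.strip()}
--
--     if not valid_sources:
--         return ""
--
--     # If all sources agree, use that name
--     if len(set(valid_sources.values())) == 1:
--         return list(valid_sources.values())[0]
--
--     # Otherwise, prioritize by source reliability
--     priority_order = ['schema_markup', 'header_text', 'title_tag', 'footer_text', 'meta_description']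
--
--     for source in priority_order:
--         if source in valid_sources:
--             return valid_sources[source]
--
--     # Fallback to first available
--     return list(valid_sources.values())[0]
-- ===== SOURCE B (Python) =====
-- _PRIORITY = ['schema_markup', 'header_text', 'title_tag', 'footer_text', 'meta_description']
-- _RANK = {name: i for i, name in enumerate(_PRIORITY)}
--
-- def _determine_primary_business_name(sources):
--     """Pick the name from the highest-priority non-blank source (single pass over the data)."""
--     valid = [(k, v) for k, v in sources.items() if v.strip()]
--     if not valid:
--         return ""
--     best = None  # (rank, value) with the smallest rank seen so far
--     for k, v in valid:
--         r = _RANK.get(k)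
--         if r is not None and (best is None or r < best[0]):
--             best = (r, v)
--     return best[1] if best is not None else valid[0][1]
-- ===== Notes on version B (the rewrite author's own statement) =====
-- stated objective: simpler
-- what changed: Instead of scanning the fixed priority list against the dict (plus a redundant all-agree set check), B builds a rank table once, filters the blank sources, and makes a single pass over the data selecting the value whose source has the minimum rank, falling back to the first valid value.
import Mathlib
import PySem

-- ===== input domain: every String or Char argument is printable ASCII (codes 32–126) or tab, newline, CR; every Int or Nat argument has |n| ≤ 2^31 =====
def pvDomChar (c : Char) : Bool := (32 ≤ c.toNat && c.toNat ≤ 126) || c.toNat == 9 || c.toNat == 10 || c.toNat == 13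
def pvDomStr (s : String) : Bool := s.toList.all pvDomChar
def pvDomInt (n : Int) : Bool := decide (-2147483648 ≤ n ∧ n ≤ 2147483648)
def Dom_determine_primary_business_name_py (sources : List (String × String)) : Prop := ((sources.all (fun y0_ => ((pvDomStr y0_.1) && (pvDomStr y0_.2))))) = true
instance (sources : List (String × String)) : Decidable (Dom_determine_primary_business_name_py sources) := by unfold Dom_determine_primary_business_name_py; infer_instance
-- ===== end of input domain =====

-- B picks the highest-priority non-blank source in one pass over the data via a rank table
-- (dropping A's redundant all-agree set check), instead of scanning the fixed priority list
-- against the dict; equal return value on every duplicate-key-free association list (= every Python dict).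

-- ===== PORT A =====
def aPriority : List String := ["schema_markup", "header_text", "title_tag", "footer_text", "meta_description"]

-- the 'for source in priority_order' loop; [] case is the final 'return list(valid_sources.values())[0]'
def aLoop (valid : PySem.Dict String String) : List String → String
  | [] => PySem.List.pyGetD valid.values 0 ""
  | s :: rest => if valid.contains s then valid.getD s "" else aLoop valid rest
    -- 'valid_sources[source]' is guarded by 'source in valid_sources', so getD's default is never used

def determine_primary_business_name_py (sources : List (String × String)) : String :=
  -- valid_sources = {k: v for k, v in sources.items() if v.strip()}
  let valid := sources.foldl
    (fun d kv => if PySem.Str.strip kv.2 ≠ "" then d.insert kv.1 kv.2 else d) PySem.Dict.empty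
  if valid.size = 0 then ""
  else if (PySem.Set.ofList valid.values).length = 1 then PySem.List.pyGetD valid.values 0 ""
  else aLoop valid aPriority

-- ===== PORT B =====
-- _RANK = {name: i for i, name in enumerate(_PRIORITY)}
def bRank : PySem.Dict String Int :=
  PySem.Dict.ofList [("schema_markup", 0), ("header_text", 1), ("title_tag", 2),
                     ("footer_text", 3), ("meta_description", 4)]

-- loop body: keep the (rank, value) with the smallest rank seen so far
def bStep (best : Option (Int × String)) (kv : String × String) : Option (Int × String) :=
  match bRank.get? kv.1 with
  | none => best
  | some r =>
    match best with
    | none => some (r, kv.2)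
    | some b => if r < b.1 then some (r, kv.2) else some b

def determine_primary_business_name_py_alt (sources : List (String × String)) : String :=
  let valid := sources.filter (fun kv => PySem.Str.strip kv.2 ≠ "")
  if valid.isEmpty then ""
  else
    match valid.foldl bStep none with
    | some b => b.2
    | none => (PySem.List.pyGetD valid 0 ("", "")).2

-- ===== PRECONDITION & SPEC =====
-- The Python argument is a dict, so its keys are distinct; Pre_ restricts the association-list
-- encoding to exactly those lists (duplicate-key lists correspond to no Python input).
def Pre_determine_primary_business_name_py (sources : List (String × String)) : Prop :=
  (sources.map Prod.fst).Nodup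
instance (sources : List (String × String)) : Decidable (Pre_determine_primary_business_name_py sources) := by unfold Pre_determine_primary_business_name_py; infer_instance

def pvWitness_determine_primary_business_name_py : (List (String × String)) :=
  [("header_text", "Acme"), ("title_tag", "Acme Inc"), ("note", " ")]

def Spec_determine_primary_business_name_py (sources : List (String × String)) (out : String) : Prop := out = determine_primary_business_name_py_alt sources
instance (sources : List (String × String)) (out : String) : Decidable (Spec_determine_primary_business_name_py sources out) := by unfold Spec_determine_primary_business_name_py; infer_instance

-- ===== CLAIM (what is proved, stated in full; the proofs are below) =====
def Claim_equal_determine_primary_business_name_py : Prop := ∀ (sources : List (String × String)), Dom_determine_primary_business_name_py sources → Pre_determine_primary_business_name_py sources → Spec_determine_primary_business_name_py sources (determine_primary_business_name_py sources)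

-- ===== LEMMAS AND PROOFS =====

-- the left-biased min-by-rank combiner that bStep folds
def pvMerge (acc : Option (Int × String)) (x : Int × String) : Option (Int × String) :=
  match acc with
  | none => some x
  | some b => if x.1 < b.1 then some x else some b

def pvToOpt (kv : String × String) : Option (Int × String) :=
  (bRank.get? kv.1).map (fun r => (r, kv.2))

-- index of s in a priority list, as an Int
def pvIdx : List String → String → Option Int
  | [], _ => none
  | p :: P, s => if s = p then some 0 else (pvIdx P s).map (· + 1)

lemma pvDict_get?_mk {ν : Type} (l : List (String × ν)) (s : String) :
    (PySem.Dict.mk l).get? s = (l.find? (fun kv => kv.1 == s)).map (·.2) := by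
  induction l with
  | nil => simp [PySem.Dict.get?]
  | cons kv rest ih => rw [PySem.Dict.get?_mk_cons]; by_cases h : kv.1 == s <;> simp [h, ih]

-- the enumerated rank table, generalized over the starting index
def pvTable : List String → Int → List (String × Int)
  | [], _ => []
  | p :: P, k => (p, k) :: pvTable P (k + 1)

lemma pvTable_find (P : List String) (s : String) (k : Int) :
    ((pvTable P k).find? (fun kv => kv.1 == s)).map (·.2) = (pvIdx P s).map (· + k) := by
  induction P generalizing k with
  | nil => rfl
  | cons p P ih =>
    simp only [pvTable, pvIdx, List.find?]
    by_cases h : p = s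
    · simp [h]
    · have hb : (p == s) = false := by simpa using h
      rw [hb, if_neg (fun hc => h hc.symm), ih (k + 1), Option.map_map]
      cases pvIdx P s <;> simp
      omega

lemma pvRank_eq_idx (s : String) : bRank.get? s = pvIdx aPriority s := by
  have h : bRank = PySem.Dict.mk (pvTable aPriority 0) := by decide
  rw [h, pvDict_get?_mk]
  rw [pvTable_find]
  cases pvIdx aPriority s <;> simp

lemma pvIdx_nonneg {P : List String} {s : String} {r : Int} (h : pvIdx P s = some r) : 0 ≤ r := by
  induction P generalizing r with
  | nil => simp [pvIdx] at h
  | cons p P ih =>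
    simp only [pvIdx] at h
    split at h
    · simp only [Option.some.injEq] at h; omega
    · cases hr : pvIdx P s with
      | none => simp [hr] at h
      | some r' => simp [hr] at h; have := ih hr; omega

lemma pvFoldl_bStep (V : List (String × String)) (acc : Option (Int × String)) :
    V.foldl bStep acc = (V.filterMap pvToOpt).foldl pvMerge acc := by
  induction V generalizing acc with
  | nil => rfl
  | cons kv V ih =>
    have hstep : bStep acc kv = (pvToOpt kv).elim acc (pvMerge acc) := by
      simp only [bStep, pvToOpt]
      cases bRank.get? kv.1 <;> cases acc <;> rfl
    cases h : pvToOpt kv with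
    | none => simp [List.foldl_cons, h, ih, hstep]
    | some x => simp [List.foldl_cons, h, ih, hstep]

lemma pvFoldl_merge_shift (L : List (Int × String)) (acc : Option (Int × String)) :
    (L.map (fun x => (x.1 + 1, x.2))).foldl pvMerge (acc.map (fun x => (x.1 + 1, x.2))) =
      (L.foldl pvMerge acc).map (fun x => (x.1 + 1, x.2)) := by
  induction L generalizing acc with
  | nil => rfl
  | cons x L ih =>
    have : pvMerge (acc.map (fun x => (x.1 + 1, x.2))) (x.1 + 1, x.2) =
        (pvMerge acc x).map (fun x => (x.1 + 1, x.2)) := by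
      cases acc with
      | none => rfl
      | some b => simp only [pvMerge, Option.map_some]; split_ifs with h1 h2 h2 <;> first | rfl | omega
    simpa [List.map_cons, List.foldl_cons, this] using ih (pvMerge acc x)

lemma pvFoldl_merge_mem (L : List (Int × String)) (acc : Option (Int × String)) (b : Int × String)
    (h : L.foldl pvMerge acc = some b) : acc = some b ∨ b ∈ L := by
  induction L generalizing acc with
  | nil => exact Or.inl h
  | cons x L ih =>
    rcases ih (pvMerge acc x) h with h' | h'
    · cases acc with
      | none => simp only [pvMerge] at h'; cases h'; exact Or.inr (List.mem_cons_self)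
      | some a =>
        simp only [pvMerge] at h'
        split_ifs at h' with hx
        · cases h'; exact Or.inr (List.mem_cons_self)
        · exact Or.inl h'
    · exact Or.inr (List.mem_cons_of_mem _ h')

lemma pvFoldl_merge_stay (L : List (Int × String)) (b : Int × String)
    (h : ∀ x ∈ L, ¬ x.1 < b.1) : L.foldl pvMerge (some b) = some b := by
  induction L with
  | nil => rfl
  | cons x L ih =>
    have hx : ¬ x.1 < b.1 := h x List.mem_cons_self
    simp only [List.foldl_cons, pvMerge, if_neg hx]
    exact ih (fun y hy => h y (List.mem_cons_of_mem _ hy))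

-- the heart: min-rank pick over the data = first hit of the priority scan
lemma pvBridge (P : List String) (V : List (String × String))
    (hV : (V.map Prod.fst).Nodup) :
    ((V.filterMap (fun kv => (pvIdx P kv.1).map (fun r => (r, kv.2)))).foldl pvMerge none).map (·.2)
      = P.findSome? (fun s => (V.find? (fun kv => kv.1 == s)).map (·.2)) := by
  induction P generalizing V with
  | nil => simp [pvIdx]
  | cons p P ih =>
    cases hf : V.find? (fun kv => kv.1 == p) with
    | none =>
      have hne : ∀ kv ∈ V, kv.1 ≠ p := by
        intro kv hkv
        have := List.find?_eq_none.mp hf kv hkv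
        simpa using this
      have hmap : V.filterMap (fun kv => (pvIdx (p :: P) kv.1).map (fun r => (r, kv.2)))
          = (V.filterMap (fun kv => (pvIdx P kv.1).map (fun r => (r, kv.2)))).map
              (fun x => (x.1 + 1, x.2)) := by
        rw [List.map_filterMap]
        apply List.filterMap_congr
        intro kv hkv
        simp only [pvIdx, if_neg (hne kv hkv), Option.map_map]
        rfl
      rw [hmap]
      have := pvFoldl_merge_shift (V.filterMap (fun kv => (pvIdx P kv.1).map (fun r => (r, kv.2)))) none
      simp only [Option.map_none] at this
      rw [this, List.findSome?_cons, hf]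
      simp only [Option.map_none, Option.map_map]
      rw [← ih V hV]
      cases (V.filterMap fun kv => Option.map (fun r => (r, kv.2)) (pvIdx P kv.1)).foldl pvMerge none <;> simp
    | some kv0 =>
      obtain ⟨hp, V1, V2, hsplit, hpre⟩ := List.find?_eq_some_iff_append.mp hf
      have hk0 : kv0.1 = p := by simpa using hp
      subst hsplit
      have hnd1 : ∀ kv ∈ V1, kv.1 ≠ p := by
        intro kv hkv; have := hpre kv hkv; simpa using this
      have hnd2 : ∀ kv ∈ V2, kv.1 ≠ p := by
        intro kv hkv hkp
        have h1 : kv0.1 ∈ V1.map Prod.fst ++ kv0.1 :: V2.map Prod.fst := by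
          simp
        have := hV
        rw [List.map_append, List.map_cons] at this
        have hnodup := (List.nodup_append.mp this).2.1
        have := (List.nodup_cons.mp hnodup).1
        exact this (by rw [hk0, ← hkp]; exact List.mem_map_of_mem hkv)
      -- candidates of the two flanks are all rank ≥ 1
      have hflank : ∀ (W : List (String × String)), (∀ kv ∈ W, kv.1 ≠ p) →
          ∀ x ∈ W.filterMap (fun kv => (pvIdx (p :: P) kv.1).map (fun r => (r, kv.2))), 1 ≤ x.1 := by
        intro W hW x hx
        obtain ⟨kv, hkv, hmap⟩ := List.mem_filterMap.mp hx
        simp only [pvIdx, if_neg (hW kv hkv)] at hmap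
        cases hr : pvIdx P kv.1 with
        | none => simp [hr] at hmap
        | some r =>
          simp only [hr, Option.map_some, Option.some.injEq] at hmap
          have := pvIdx_nonneg hr
          rw [← hmap]
          simpa using by omega
      have hkv0 : pvIdx (p :: P) kv0.1 = some 0 := by simp [pvIdx, hk0]
      rw [List.filterMap_append, List.filterMap_cons, hkv0]
      simp only [Option.map_some]
      rw [List.foldl_append, List.foldl_cons]
      set L1 := V1.filterMap (fun kv => (pvIdx (p :: P) kv.1).map (fun r => (r, kv.2))) with hL1
      set L2 := V2.filterMap (fun kv => (pvIdx (p :: P) kv.1).map (fun r => (r, kv.2))) with hL2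
      have hmid : pvMerge (L1.foldl pvMerge none) (0, kv0.2) = some (0, kv0.2) := by
        cases hb : L1.foldl pvMerge none with
        | none => rfl
        | some b =>
          rcases pvFoldl_merge_mem L1 none b hb with h' | h'
          · exact absurd h' (by simp)
          · have := hflank V1 hnd1 b h'
            simp only [pvMerge]
            rw [if_pos (by omega)]
      rw [hmid, pvFoldl_merge_stay]
      · rw [List.findSome?_cons, hf]; rfl
      · intro x hx
        have := hflank V2 hnd2 x hx
        omega

-- every value B can return comes from V's values
lemma pvAlt_mem (V : List (String × String)) (hne : V ≠ []) :
    (match V.foldl bStep none with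
      | some b => b.2
      | none => (PySem.List.pyGetD V 0 ("", "")).2) ∈ V.map Prod.snd := by
  cases hb : V.foldl bStep none with
  | none =>
    cases V with
    | nil => exact absurd rfl hne
    | cons kv V => simp [PySem.List.pyGetD_zero_cons]
  | some b =>
    rw [pvFoldl_bStep] at hb
    rcases pvFoldl_merge_mem _ none b hb with h' | h'
    · exact absurd h' (by simp)
    · obtain ⟨kv, hkv, hmap⟩ := List.mem_filterMap.mp h'
      simp only [pvToOpt] at hmap
      cases hr : bRank.get? kv.1 with
      | none => simp [hr] at hmap
      | some r =>
        simp only [hr, Option.map_some, Option.some.injEq] at hmap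
        simp only [← hmap]
        exact List.mem_map_of_mem hkv

-- A's dict of valid sources is literally the filtered list
lemma pvValid_eq (sources : List (String × String))
    (hnd : (sources.map Prod.fst).Nodup) :
    sources.foldl (fun d kv => if PySem.Str.strip kv.2 ≠ "" then d.insert kv.1 kv.2 else d)
        PySem.Dict.empty
      = PySem.Dict.mk (sources.filter (fun kv => PySem.Str.strip kv.2 ≠ "")) := by
  have h1 : (sources.filter (fun kv => PySem.Str.strip kv.2 ≠ "")).foldl
      (fun d kv => d.insert kv.1 kv.2) PySem.Dict.empty
      = sources.foldl (fun d kv => if PySem.Str.strip kv.2 ≠ "" then d.insert kv.1 kv.2 else d)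
          PySem.Dict.empty := by
    rw [List.foldl_filter]
    simp only [decide_not, Bool.not_eq_eq_eq_not, Bool.not_true, decide_eq_false_iff_not,
      ne_eq, ite_not]
  rw [← h1]
  apply PySem.Dict.ext
  have h2 := PySem.Dict.items_foldl_insert_fresh
    (sources.filter (fun kv => PySem.Str.strip kv.2 ≠ "")) Prod.fst Prod.snd PySem.Dict.empty
    (fun a _ => PySem.Dict.contains_empty (ν := String) a)
    ((List.filter_sublist.map Prod.fst).nodup hnd)
  simpa using h2

lemma pvLoop_eq (V : List (String × String)) (P : List String) :
    aLoop (PySem.Dict.mk V) P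
      = (P.findSome? (fun s => (V.find? (fun kv => kv.1 == s)).map (·.2))).getD
          (PySem.List.pyGetD (V.map Prod.snd) 0 "") := by
  induction P with
  | nil => simp [aLoop, PySem.Dict.values]
  | cons s P ih =>
    simp only [aLoop, List.findSome?_cons]
    rw [PySem.Dict.contains_eq_isSome_get?, pvDict_get?_mk]
    cases hf : V.find? (fun kv => kv.1 == s) with
    | none => simpa [hf] using ih
    | some kv =>
      simp only [Option.map_some, Option.isSome_some, if_true, Option.getD_some]
      rw [PySem.Dict.getD_eq_get?_getD, pvDict_get?_mk, hf]
      rfl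

-- if the distinct values form a singleton set, every value equals the first one
lemma pvAllEq (l : List String) (h : (PySem.Set.ofList l).length = 1) :
    ∀ y ∈ l, y = PySem.List.pyGetD l 0 "" := by
  cases hs : PySem.Set.ofList l with
  | nil => rw [hs] at h; simp at h
  | cons x rest =>
    cases rest with
    | cons _ _ => rw [hs] at h; simp at h
    | nil =>
      intro y hy
      have hyx : y = x := by
        have := (PySem.Set.mem_ofList l y).mpr hy
        rw [hs] at this; simpa using this
      cases l with
      | nil => simp at hy
      | cons a l' =>
        have hax : a = x := by
          have := (PySem.Set.mem_ofList (a :: l') a).mpr List.mem_cons_self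
          rw [hs] at this; simpa using this
        rw [PySem.List.pyGetD_zero_cons, hyx, hax]

-- ===== VERDICT (by name: the statement is the Claim_ definition above) =====
theorem determine_primary_business_name_py_spec : Claim_equal_determine_primary_business_name_py := by
  intro sources _hdom hnd
  unfold Spec_determine_primary_business_name_py
  unfold determine_primary_business_name_py determine_primary_business_name_py_alt
  simp only []
  rw [pvValid_eq sources hnd]
  set V := sources.filter (fun kv => PySem.Str.strip kv.2 ≠ "") with hVdef
  have hVnd : (V.map Prod.fst).Nodup := (List.filter_sublist.map Prod.fst).nodup hnd
  have hsize : (PySem.Dict.mk V).size = V.length := rfl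
  have hvalues : (PySem.Dict.mk V).values = V.map Prod.snd := rfl
  by_cases hemp : V = []
  · simp [hemp, PySem.Dict.size]
  · have hlen : ¬ (PySem.Dict.mk V).size = 0 := by
      rw [hsize]; simpa using (List.length_pos_iff.mpr hemp).ne'
    have hlistemp : V.isEmpty = false := by simpa [List.isEmpty_iff] using hemp
    rw [if_neg hlen, hlistemp]
    simp only [Bool.false_eq_true, if_false, hvalues]
    -- B's branch value, via the bridge
    have hB : (match V.foldl bStep none with
        | some b => b.2
        | none => (PySem.List.pyGetD V 0 ("", "")).2)
        = (aPriority.findSome? (fun s => (V.find? (fun kv => kv.1 == s)).map (·.2))).getD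
            (PySem.List.pyGetD (V.map Prod.snd) 0 "") := by
      have hbr := pvBridge aPriority V hVnd
      have hcands : V.filterMap (fun kv => (pvIdx aPriority kv.1).map (fun r => (r, kv.2)))
          = V.filterMap pvToOpt := by
        apply List.filterMap_congr
        intro kv _
        rw [pvToOpt, pvRank_eq_idx]
      rw [hcands] at hbr
      rw [pvFoldl_bStep]
      cases hb : (V.filterMap pvToOpt).foldl pvMerge none with
      | none =>
        rw [hb] at hbr
        simp only [Option.map_none] at hbr
        rw [← hbr, Option.getD_none]
        obtain ⟨kv, V', hV'⟩ := List.exists_cons_of_ne_nil hemp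
        rw [hV']
        simp [PySem.List.pyGetD_zero_cons]
      | some b =>
        rw [hb] at hbr
        simp only [Option.map_some] at hbr
        rw [← hbr, Option.getD_some]
    by_cases hone : (PySem.Set.ofList (V.map Prod.snd)).length = 1
    · rw [if_pos hone]
      have hmem : (match V.foldl bStep none with
          | some b => b.2
          | none => (PySem.List.pyGetD V 0 ("", "")).2) ∈ V.map Prod.snd := pvAlt_mem V hemp
      exact (pvAllEq (V.map Prod.snd) hone _ hmem).symm
    · rw [if_neg hone, pvLoop_eq V aPriority, hB]
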